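-- pv_equiv track=rewrite | github.com/yuanyao366/douma_algo_training_camp | src/com/douma/written_test/zijie/_20211010/_3_Min_Max_Num.py | sort_min_num
-- ===== SOURCE A (Python) =====
-- def sort_min_num(s):
--     """
--     将字符串排序成最小整数，且开头不能有 0
--     比如:
--         字符串 1010 排序后就是 1001
--         字符串 0100 排序后就是 1000
--         字符串 9128 排序后就是 1289
--     """
--     non_zeros = []
--     for c in s:
--         if c != '0':
--             non_zeros.append(c)
--
--     if len(non_zeros) == len(s):
--         res = list(s)
--         res.sort()
--         return "".join(res)
--     elif len(non_zeros) == 0: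
--         return s
--
--     non_zeros.sort()
--     res = [non_zeros[0]]
--     for _ in range(len(s) - len(non_zeros)):
--         res.append('0')
--
--     for i in range(1, len(non_zeros)):
--         res.append(non_zeros[i])
--
--     return "".join(res)
-- ===== SOURCE B (Python) =====
-- def sort_min_num(s):
--     # Counting sort over ASCII codes: one pass of counting, then emit
--     # smallest non-'0' char, the zeros, and the rest in code order.
--     counts = [0] * 128
--     zeros = 0
--     for c in s:
--         if c == '0':
--             zeros += 1
--         else:
--             counts[ord(c)] += 1
--     if zeros == 0:
--         return ''.join(chr(i) * counts[i] for i in range(128))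
--     if zeros == len(s):
--         return s
--     first = next(i for i in range(128) if counts[i] > 0)
--     counts[first] -= 1
--     return chr(first) + '0' * zeros + ''.join(chr(i) * counts[i] for i in range(128))
-- ===== Notes on version B (the rewrite author's own statement) =====
-- stated objective: alternative
-- what changed: Replaces the filter-then-comparison-sort (list.sort) construction with a single counting pass over 128 ASCII codes and a linear emission (counting sort), placing the smallest non-zero character before the zeros.
import Mathlib
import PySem

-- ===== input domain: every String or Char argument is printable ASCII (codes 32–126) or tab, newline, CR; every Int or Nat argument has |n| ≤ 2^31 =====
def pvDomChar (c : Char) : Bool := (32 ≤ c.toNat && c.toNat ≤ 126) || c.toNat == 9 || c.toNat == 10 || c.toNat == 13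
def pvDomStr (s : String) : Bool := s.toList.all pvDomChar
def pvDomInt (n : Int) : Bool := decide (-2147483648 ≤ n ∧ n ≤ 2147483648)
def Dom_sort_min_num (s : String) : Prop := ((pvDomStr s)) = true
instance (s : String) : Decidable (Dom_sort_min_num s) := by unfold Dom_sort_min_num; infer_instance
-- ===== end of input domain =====

-- B replaces A's filter + comparison sort by a one-pass counting sort over the 128 ASCII codes (an alternative, linear-emission algorithm).

-- ===== PORT A =====
def sort_min_num (s : String) : String :=
  let cs := s.toList
  let non_zeros := cs.foldl (fun acc c => if c ≠ '0' then acc ++ [c] else acc) ([] : List Char)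
  if non_zeros.length = cs.length then
    String.ofList (PySem.List.sorted cs (fun x => x) false)
  else if non_zeros.length = 0 then s
  else
    let nzs := PySem.List.sorted non_zeros (fun x => x) false
    let res := [PySem.List.pyGetD nzs 0 ' ']
    let res := (PySem.List.pyRange 0 ((cs.length : Int) - (non_zeros.length : Int)) 1).foldl
      (fun acc _ => acc ++ ['0']) res
    let res := (PySem.List.pyRange 1 ((nzs.length : Int)) 1).foldl
      (fun acc i => acc ++ [PySem.List.pyGetD nzs i ' ']) res
    String.ofList res

-- ===== PORT B =====
def sort_min_num_alt (s : String) : String :=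
  let cs := s.toList
  let st := cs.foldl (fun (st : List Nat × Nat) c =>
      if c = '0' then (st.1, st.2 + 1)
      else (st.1.set c.toNat (st.1.getD c.toNat 0 + 1), st.2)) (List.replicate 128 0, 0)
  let counts := st.1
  let zeros := st.2
  if zeros = 0 then
    String.ofList ((List.range 128).flatMap (fun i => List.replicate (counts.getD i 0) (Char.ofNat i)))
  else if zeros = cs.length then s
  else
    match (List.range 128).find? (fun i => decide (0 < counts.getD i 0)) with
    | none => ""   -- unreachable inside Dom (some non-'0' char with code < 128 exists)
    | some first =>
      let counts' := counts.set first (counts.getD first 0 - 1)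
      String.ofList (Char.ofNat first :: (List.replicate zeros '0'
        ++ (List.range 128).flatMap (fun i => List.replicate (counts'.getD i 0) (Char.ofNat i))))

-- ===== PRECONDITION & SPEC =====
def Spec_sort_min_num (s : String) (out : String) : Prop := out = sort_min_num_alt s
instance (s : String) (out : String) : Decidable (Spec_sort_min_num s out) := by unfold Spec_sort_min_num; infer_instance

-- ===== CLAIM (what is proved, stated in full; the proofs are below) =====
def Claim_equal_sort_min_num : Prop := ∀ (s : String), Dom_sort_min_num s → Spec_sort_min_num s (sort_min_num s)

-- ===== LEMMAS AND PROOFS =====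

-- emission of a counting table over codes a..a+n (proof-side view of B's flatMap)
def pvEmit (counts : List Nat) (a n : Nat) : List Char :=
  (List.range' a n).flatMap (fun i => List.replicate (counts.getD i 0) (Char.ofNat i))

lemma pvToNat_ofNat {i : Nat} (h : i < 128) : (Char.ofNat i).toNat = i := by
  rw [Char.toNat_ofNat, if_pos (Or.inl (by omega))]

lemma pvOfNat_eq_iff {c : Char} {i : Nat} (hi : i < 128) : Char.ofNat i = c ↔ i = c.toNat := by
  constructor
  · intro h; rw [← h, pvToNat_ofNat hi]
  · intro h; rw [h, Char.ofNat_toNat]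

lemma pvOfNat_le {i j : Nat} (hi : i < 128) (hj : j < 128) (h : i ≤ j) :
    Char.ofNat i ≤ Char.ofNat j := by
  rw [Char.le_def, UInt32.le_iff_toNat_le]
  show (Char.ofNat i).toNat ≤ (Char.ofNat j).toNat
  rw [pvToNat_ofNat hi, pvToNat_ofNat hj]; exact h

lemma pvMem_emit {counts : List Nat} {a n : Nat} {c : Char} (h : c ∈ pvEmit counts a n) :
    ∃ j, a ≤ j ∧ j < a + n ∧ c = Char.ofNat j := by
  simp only [pvEmit, List.mem_flatMap, List.mem_range'_1, List.mem_replicate] at h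
  obtain ⟨j, ⟨h1, h2⟩, _, h3⟩ := h
  exact ⟨j, h1, h2, h3⟩

lemma pvEmit_pairwise (counts : List Nat) (n : Nat) :
    ∀ a, a + n ≤ 128 → (pvEmit counts a n).Pairwise (· ≤ ·) := by
  induction n with
  | zero => intro a _; simp [pvEmit]
  | succ n ih =>
    intro a hb
    have hsplit : pvEmit counts a (n + 1) =
        List.replicate (counts.getD a 0) (Char.ofNat a) ++ pvEmit counts (a + 1) n := by
      simp [pvEmit, List.range'_succ]
    rw [hsplit, List.pairwise_append]
    refine ⟨List.pairwise_replicate.mpr (Or.inr le_rfl), ih (a + 1) (by omega), ?_⟩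
    intro x hx y hy
    rw [List.eq_of_mem_replicate hx]
    obtain ⟨j, hj1, hj2, rfl⟩ := pvMem_emit hy
    exact pvOfNat_le (by omega) (by omega) (by omega)

lemma pvEmit_count (counts : List Nat) (n : Nat) :
    ∀ a, a + n ≤ 128 → ∀ c : Char,
      (pvEmit counts a n).count c =
        if a ≤ c.toNat ∧ c.toNat < a + n then counts.getD c.toNat 0 else 0 := by
  induction n with
  | zero => intro a _ c; rw [if_neg (by omega)]; simp [pvEmit]
  | succ n ih =>
    intro a hb c
    have hsplit : pvEmit counts a (n + 1) =
        List.replicate (counts.getD a 0) (Char.ofNat a) ++ pvEmit counts (a + 1) n := by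
      simp [pvEmit, List.range'_succ]
    rw [hsplit, List.count_append, List.count_replicate, ih (a + 1) (by omega) c]
    by_cases hc : a = c.toNat
    · rw [if_pos (by rw [beq_iff_eq, pvOfNat_eq_iff (by omega)]; exact hc),
        if_neg (by omega), if_pos (by omega), hc]
      omega
    · rw [if_neg (by rw [beq_iff_eq, pvOfNat_eq_iff (by omega)]; exact hc)]
      by_cases hrange : a + 1 ≤ c.toNat ∧ c.toNat < a + 1 + n
      · rw [if_pos hrange, if_pos (by omega)]; omega
      · rw [if_neg hrange, if_neg (by omega)]

lemma pvEmit_sorted (counts : List Nat) (l : List Char)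
    (hcounts : ∀ i, i < 128 → counts.getD i 0 = l.count (Char.ofNat i))
    (hl : ∀ c ∈ l, c.toNat < 128) :
    PySem.List.sorted l (fun x => x) false = pvEmit counts 0 128 := by
  apply PySem.List.sorted_id_eq_of_perm_of_pairwise
  · rw [List.perm_iff_count]
    intro c
    rw [pvEmit_count counts 128 0 (by omega) c]
    by_cases h : c.toNat < 128
    · rw [if_pos (by omega), hcounts c.toNat h, Char.ofNat_toNat]
    · rw [if_neg (by omega)]
      symm; rw [List.count_eq_zero]
      intro hc; exact h (hl c hc)
  · exact pvEmit_pairwise counts 128 0 (by omega)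

lemma pvEmit_congr (c1 c2 : List Nat) (n : Nat) :
    ∀ a, (∀ i, a ≤ i → i < a + n → c1.getD i 0 = c2.getD i 0) →
      pvEmit c1 a n = pvEmit c2 a n := by
  induction n with
  | zero => intro a _; simp [pvEmit]
  | succ n ih =>
    intro a h
    simp only [pvEmit, List.range'_succ, List.flatMap_cons]
    rw [h a le_rfl (by omega)]
    have := ih (a + 1) (fun i h1 h2 => h i (by omega) (by omega))
    simp only [pvEmit] at this
    rw [this]

lemma pvEmit_head (counts : List Nat) (hlen : counts.length = 128) (m : Char) (n : Nat) :
    ∀ a, a + n ≤ 128 → ∀ t, pvEmit counts a n = m :: t →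
      (List.range' a n).find? (fun i => decide (0 < counts.getD i 0)) = some m.toNat ∧
      pvEmit (counts.set m.toNat (counts.getD m.toNat 0 - 1)) a n = t ∧ a ≤ m.toNat := by
  induction n with
  | zero => intro a _ t h; simp [pvEmit] at h
  | succ n ih =>
    intro a hb t h
    have hsplit : ∀ cn : List Nat, pvEmit cn a (n + 1) =
        List.replicate (cn.getD a 0) (Char.ofNat a) ++ pvEmit cn (a + 1) n := by
      intro cn; simp [pvEmit, List.range'_succ]
    by_cases h0 : counts.getD a 0 = 0
    · rw [hsplit counts, h0] at h
      simp only [List.replicate_zero, List.nil_append] at h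
      obtain ⟨hf, he, hle⟩ := ih (a + 1) (by omega) t h
      refine ⟨?_, ?_, by omega⟩
      · rw [List.range'_succ, List.find?_cons_of_neg (by simpa [List.getD_eq_getElem?_getD] using h0), hf]
      · rw [hsplit]
        have hne : (counts.set m.toNat (counts.getD m.toNat 0 - 1)).getD a 0 = 0 := by
          rw [List.getD_eq_getElem?_getD, List.getElem?_set_ne (by omega)]
          rw [← List.getD_eq_getElem?_getD]
          exact h0
        rw [hne]
        simp only [List.replicate_zero, List.nil_append]
        exact he
    · rw [hsplit counts] at h
      have hg : counts.getD a 0 = (counts.getD a 0 - 1) + 1 := by omega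
      rw [hg, List.replicate_succ, List.cons_append] at h
      injection h with hm ht
      have hma : m.toNat = a := by rw [← hm, pvToNat_ofNat (by omega)]
      refine ⟨?_, ?_, by omega⟩
      · rw [List.range'_succ, List.find?_cons_of_pos (by simpa using Nat.pos_of_ne_zero h0), hma]
      · rw [hsplit, hma]
        have h1 : (counts.set a (counts.getD a 0 - 1)).getD a 0 = counts.getD a 0 - 1 := by
          rw [List.getD_eq_getElem?_getD, List.getElem?_set_self (by omega)]; rfl
        have h2 : pvEmit (counts.set a (counts.getD a 0 - 1)) (a + 1) n =
            pvEmit counts (a + 1) n := by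
          apply pvEmit_congr
          intro i hi1 hi2
          rw [List.getD_eq_getElem?_getD, List.getElem?_set_ne (by omega),
            ← List.getD_eq_getElem?_getD]
        rw [h1, h2]
        exact ht

lemma pvFoldB (cs : List Char) :
    ∀ (cnts : List Nat) (z : Nat), cnts.length = 128 → (∀ c ∈ cs, c.toNat < 128) →
      (cs.foldl (fun (st : List Nat × Nat) c =>
          if c = '0' then (st.1, st.2 + 1)
          else (st.1.set c.toNat (st.1.getD c.toNat 0 + 1), st.2)) (cnts, z)).1.length = 128 ∧
      (cs.foldl (fun (st : List Nat × Nat) c =>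
          if c = '0' then (st.1, st.2 + 1)
          else (st.1.set c.toNat (st.1.getD c.toNat 0 + 1), st.2)) (cnts, z)).2 = z + cs.count '0' ∧
      ∀ i, i < 128 →
        (cs.foldl (fun (st : List Nat × Nat) c =>
          if c = '0' then (st.1, st.2 + 1)
          else (st.1.set c.toNat (st.1.getD c.toNat 0 + 1), st.2)) (cnts, z)).1.getD i 0 =
        cnts.getD i 0 + (cs.filter (fun c => decide (c ≠ '0'))).count (Char.ofNat i) := by
  induction cs with
  | nil =>
    intro cnts z hl _
    refine ⟨hl, by simp, ?_⟩
    intro i hi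
    simp
  | cons c cs ih =>
    intro cnts z hl hdom
    have hdc : c.toNat < 128 := hdom c List.mem_cons_self
    by_cases hc : c = '0'
    · subst hc
      rw [List.foldl_cons, if_pos rfl]
      obtain ⟨h1, h2, h3⟩ := ih cnts (z + 1) hl (fun x hx => hdom x (List.mem_cons_of_mem _ hx))
      refine ⟨h1, by rw [h2, List.count_cons_self]; omega, ?_⟩
      intro i hi
      rw [h3 i hi]
      simp
    · rw [List.foldl_cons, if_neg hc]
      obtain ⟨h1, h2, h3⟩ := ih (cnts.set c.toNat (cnts.getD c.toNat 0 + 1)) z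
        (by rw [List.length_set]; exact hl) (fun x hx => hdom x (List.mem_cons_of_mem _ hx))
      refine ⟨h1, ?_, ?_⟩
      · have hc' : ¬ ('0' = c) := fun hh => hc hh.symm
        rw [h2]
        simp [hc]
      · intro i hi
        rw [h3 i hi, List.filter_cons_of_pos (by simp [hc]), List.count_cons]
        by_cases hic : i = c.toNat
        · subst hic
          rw [List.getD_eq_getElem?_getD, List.getElem?_set_self (by omega), Option.getD_some]
          simp only [Char.ofNat_toNat, beq_self_eq_true, if_pos]
          omega
        · have hne : Char.ofNat i ≠ c := fun hh => hic (by rw [← hh, pvToNat_ofNat hi])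
          have hne' : c ≠ Char.ofNat i := fun hh => hne hh.symm
          rw [List.getD_eq_getElem?_getD, List.getElem?_set_ne (by omega),
            ← List.getD_eq_getElem?_getD]
          simp [hne']

lemma pvLen (cs : List Char) :
    cs.length = cs.count '0' + (cs.filter (fun c => decide (c ≠ '0'))).length := by
  induction cs with
  | nil => simp
  | cons c cs ih =>
    by_cases hc : c = '0'
    · subst hc; rw [List.length_cons, List.count_cons_self, List.filter_cons_of_neg (by simp)]
      omega
    · rw [List.length_cons, List.count_cons, if_neg (by simp [hc]),
        List.filter_cons_of_pos (by simp [hc]), List.length_cons]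
      omega

lemma pvMain (s : String) (hlt : ∀ c ∈ s.toList, c.toNat < 128) :
    sort_min_num s = sort_min_num_alt s := by
  simp only [sort_min_num, sort_min_num_alt]
  rw [PySem.List.foldl_append_ite_eq_filter]
  simp only [List.nil_append]
  obtain ⟨hL, hZ, hC⟩ := pvFoldB s.toList (List.replicate 128 0) 0 (by simp) hlt
  set F := List.foldl (fun (st : List Nat × Nat) c =>
      if c = '0' then (st.1, st.2 + 1)
      else (st.1.set c.toNat (st.1.getD c.toNat 0 + 1), st.2)) (List.replicate 128 0, 0) s.toList
    with hF
  set nz := s.toList.filter (fun x => decide (x ≠ '0')) with hnzdef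
  have hC' : ∀ i, i < 128 → F.1.getD i 0 = nz.count (Char.ofNat i) := by
    intro i hi
    rw [hC i hi, List.getD_eq_getElem?_getD, List.getElem?_replicate, if_pos hi]
    simp
  have hlen := pvLen s.toList
  rw [← hnzdef] at hlen
  have hzF : F.2 = s.toList.count '0' := by rw [hZ, Nat.zero_add]
  have hnzdom : ∀ c ∈ nz, c.toNat < 128 := fun c hc => hlt c (List.mem_of_mem_filter hc)
  by_cases h0 : s.toList.count '0' = 0
  · rw [if_pos (by omega), if_pos (by omega)]
    have h0' : '0' ∉ s.toList := List.count_eq_zero.mp h0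
    have hfe : nz = s.toList := by
      rw [hnzdef]
      refine List.filter_eq_self.mpr ?_
      intro a ha
      simp only [ne_eq, decide_eq_true_eq]
      intro hh; subst hh; exact h0' ha
    apply congrArg String.ofList
    have hs := pvEmit_sorted F.1 nz hC' hnzdom
    rw [hfe] at hs
    rw [hs]
    simp [pvEmit, List.range_eq_range']
  · by_cases h1 : s.toList.count '0' = s.toList.length
    · rw [if_neg (by omega), if_pos (by omega), if_neg (by omega), if_pos (by omega)]
    · have hcl : s.toList.count '0' ≤ s.toList.length := List.count_le_length
      rw [if_neg (by omega), if_neg (by omega), if_neg (by omega), if_neg (by omega)]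
      have hnzne : nz ≠ [] := by
        intro hh
        have := congrArg List.length hh
        simp only [List.length_nil] at this
        omega
      cases hmt : PySem.List.sorted nz (fun x => x) false with
      | nil => exact absurd ((PySem.List.sorted_eq_nil_iff _ _ _).mp hmt) hnzne
      | cons m t =>
        have hs := pvEmit_sorted F.1 nz hC' hnzdom
        have hmem : pvEmit F.1 0 128 = m :: t := by rw [← hs, hmt]
        obtain ⟨hfind, hdec, -⟩ := pvEmit_head F.1 hL m 128 0 (by omega) t hmem
        rw [PySem.List.pyGetD_zero_cons,
          PySem.List.foldl_append_singleton_eq_map (fun _ => '0'),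
          PySem.List.foldl_pyRange_pyGetD' (m :: t) ' ' (fun acc c => acc ++ [c]) _ (by norm_num),
          List.map_const', PySem.List.length_pyRange_one,
          List.range_eq_range', hfind]
        apply congrArg String.ofList
        have hz' : ((s.toList.length : Int) - (nz.length : Int) - 0).toNat = s.toList.count '0' := by
          omega
        rw [Char.ofNat_toNat]
        have hdec' : (List.range' 0 128).flatMap (fun i =>
            List.replicate ((F.1.set m.toNat (F.1.getD m.toNat 0 - 1)).getD i 0) (Char.ofNat i)) = t := hdec
        rw [hdec', hzF, hz']
        simp [← List.flatMap_def]

-- ===== VERDICT (by name: the statement is the Claim_ definition above) =====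
theorem sort_min_num_spec : Claim_equal_sort_min_num := by
  intro s hdom
  have hdom' : s.toList.all pvDomChar = true := hdom
  have hlt : ∀ c ∈ s.toList, c.toNat < 128 := by
    intro c hc
    have h1 := List.all_eq_true.mp hdom' c hc
    simp only [pvDomChar, Bool.or_eq_true, Bool.and_eq_true, decide_eq_true_eq, beq_iff_eq] at h1
    omega
  exact pvMain s hlt
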